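-- pv_equiv track=rewrite | github.com/Gouldilocks/connect_4_website | backend/gentleman_agent_reactive.py | num_possible_wins
-- ===== SOURCE A (Python) =====
-- def num_possible_wins(board, player):
--   num_in_wins_for_player = []
--   num_in_wins_for_opp = []
--   # Check for horizontal wins
--   for i in range(len(board)):
--       for j in range(len(board[0]) - 3):
--           num_in_wins_for_player.append(0)
--           num_in_wins_for_opp.append(0)
--           for k in range(4):
--               if board[i][j+k] == player:
--                   num_in_wins_for_player[-1] += 1
--               elif board[i][j+k] == -player:
--                   num_in_wins_for_opp[-1] += 1
--
--   # Check for vertical wins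
--   for i in range(len(board) - 3):
--       for j in range(len(board[0])):
--           num_in_wins_for_player.append(0)
--           num_in_wins_for_opp.append(0)
--           for k in range(4):
--               if board[i+k][j] == player:
--                   num_in_wins_for_player[-1] += 1
--               elif board[i+k][j] == -player:
--                   num_in_wins_for_opp[-1] += 1
--
--   # Check for positive diagonal wins
--   for i in range(len(board) - 3):
--       for j in range(len(board[0]) - 3):
--           num_in_wins_for_player.append(0)
--           num_in_wins_for_opp.append(0)
--           for k in range(4):
--               if board[i+k][j+k] == player:
--                   num_in_wins_for_player[-1] += 1
--               elif board[i+k][j+k] == -player: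
--                   num_in_wins_for_opp[-1] += 1
--
--   # Check for negative diagonal wins
--   for i in range(3, len(board)):
--       for j in range(len(board[0]) - 3):
--           num_in_wins_for_player.append(0)
--           num_in_wins_for_opp.append(0)
--           for k in range(4):
--               if board[i-k][j+k] == player:
--                   num_in_wins_for_player[-1] += 1
--               elif board[i-k][j+k] == -player:
--                   num_in_wins_for_opp[-1] += 1
--
--   # Cancel any of them that have been filled
--   for i in range(len(num_in_wins_for_player)):
--       if num_in_wins_for_player[i] + num_in_wins_for_opp[i] == 4:
--           num_in_wins_for_player[i] = 0
--           num_in_wins_for_opp[i] = 0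
--
--   playerTotal = 0
--   oppTotal = 0
--
--   # Check for ruined wins
--   for i in range(len(num_in_wins_for_player)):
--       if num_in_wins_for_player[i] == 0 and num_in_wins_for_opp[i] == 0:
--           pass
--       elif num_in_wins_for_player[i] == 0:
--           oppTotal += 1
--       elif num_in_wins_for_opp[i] == 0:
--           playerTotal += 1
--
--   return playerTotal, oppTotal
-- ===== SOURCE B (Python) =====
-- def _drift_table(board, rows, cols, player, di, dj):
--     # tab[i][j] = (#player cells, #opponent cells) among the run of cells
--     # (i, j), (i-di, j-dj), (i-2*di, j-2*dj), ... while they stay on the board.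
--     tab = []
--     for i in range(rows):
--         row = []
--         for j in range(cols):
--             pi, pj = i - di, j - dj
--             if 0 <= pi and 0 <= pj < cols:
--                 p, o = row[pj] if pi == i else tab[pi][pj]
--             else:
--                 p, o = 0, 0
--             v = board[i][j]
--             if v == player:
--                 p += 1
--             elif v == -player:
--                 o += 1
--             row.append((p, o))
--         tab.append(row)
--     return tab
--
--
-- def num_possible_wins(board, player):
--     rows = len(board)
--     cols = len(board[0]) if rows else 0
--     player_total = 0
--     opp_total = 0
--     for di, dj in ((0, 1), (1, 0), (1, 1), (1, -1)):
--         tab = _drift_table(board, rows, cols, player, di, dj)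
--         for ei in range(rows):
--             for ej in range(cols):
--                 # (ei, ej) is the last cell of the window; its first cell must be on the board
--                 si, sj = ei - 3 * di, ej - 3 * dj
--                 if 0 <= si < rows and 0 <= sj < cols:
--                     p, o = tab[ei][ej]
--                     bi, bj = ei - 4 * di, ej - 4 * dj
--                     if 0 <= bi and 0 <= bj < cols:
--                         bp, bo = tab[bi][bj]
--                         p -= bp
--                         o -= bo
--                     if o == 0 and 0 < p < 4:
--                         player_total += 1
--                     elif p == 0 and 0 < o < 4:
--                         opp_total += 1
--     return player_total, opp_total
-- ===== Notes on version B (the rewrite author's own statement) =====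
-- stated objective: alternative
-- what changed: B precomputes, for each of the four directions, a dynamic-programming table of running (player, opponent) piece counts along that direction, and classifies each 4-window from two table lookups (a difference of prefix counts), instead of A's per-window 4-cell scans into two parallel lists followed by separate cancellation and classification passes.
-- outside the precondition, e.g. on num_possible_wins([[0, 0, 0], [0]], 1): A returns (0, 0), B raises IndexError
import Mathlib
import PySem

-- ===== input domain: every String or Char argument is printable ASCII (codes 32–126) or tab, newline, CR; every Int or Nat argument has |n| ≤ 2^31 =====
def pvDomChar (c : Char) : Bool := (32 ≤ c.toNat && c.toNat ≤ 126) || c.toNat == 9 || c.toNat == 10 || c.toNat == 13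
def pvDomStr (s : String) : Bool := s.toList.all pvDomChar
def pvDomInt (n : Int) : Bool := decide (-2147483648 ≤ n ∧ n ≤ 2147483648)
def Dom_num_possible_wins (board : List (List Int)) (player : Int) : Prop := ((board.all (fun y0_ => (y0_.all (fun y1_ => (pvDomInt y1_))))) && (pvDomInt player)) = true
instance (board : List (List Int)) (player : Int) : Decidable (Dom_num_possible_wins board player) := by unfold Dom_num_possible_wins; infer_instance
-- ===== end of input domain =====

-- B replaces A's per-window 4-cell scans (two parallel lists, then a cancellation pass and a
-- classification pass) by four dynamic-programming tables of running directional piece counts,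
-- classifying each window from two table lookups (objective: alternative algorithm).

-- ===== PORT A =====
-- board[i][j]: under Pre_ every access in the loops is in range, so the default 0 is never read.
def num_possible_wins (board : List (List Int)) (player : Int) : Int × Int :=
  let cell : Int → Int → Int := fun i j => PySem.List.pyGetD (PySem.List.pyGetD board i []) j 0
  -- len(board[0]); on an empty board Python never evaluates it (all loops are empty), and the
  -- defaulted value 0 likewise empties every range below, so the port is exact there too.
  let cols : Int := PySem.List.len (PySem.List.pyGetD board 0 [])
  -- horizontal windows
  let s1 : List Int × List Int :=
    (PySem.List.pyRange 0 (PySem.List.len board) 1).foldl (fun s i =>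
      (PySem.List.pyRange 0 (cols - 3) 1).foldl (fun s j =>
        let po : Int × Int := (PySem.List.pyRange 0 4 1).foldl (fun po k =>
          if cell i (j + k) = player then (po.1 + 1, po.2)
          else if cell i (j + k) = -player then (po.1, po.2 + 1) else po) (0, 0)
        (s.1 ++ [po.1], s.2 ++ [po.2])) s) (([], []) : List Int × List Int)
  -- vertical windows
  let s2 : List Int × List Int :=
    (PySem.List.pyRange 0 (PySem.List.len board - 3) 1).foldl (fun s i =>
      (PySem.List.pyRange 0 cols 1).foldl (fun s j =>
        let po : Int × Int := (PySem.List.pyRange 0 4 1).foldl (fun po k =>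
          if cell (i + k) j = player then (po.1 + 1, po.2)
          else if cell (i + k) j = -player then (po.1, po.2 + 1) else po) (0, 0)
        (s.1 ++ [po.1], s.2 ++ [po.2])) s) s1
  -- positive diagonal windows
  let s3 : List Int × List Int :=
    (PySem.List.pyRange 0 (PySem.List.len board - 3) 1).foldl (fun s i =>
      (PySem.List.pyRange 0 (cols - 3) 1).foldl (fun s j =>
        let po : Int × Int := (PySem.List.pyRange 0 4 1).foldl (fun po k =>
          if cell (i + k) (j + k) = player then (po.1 + 1, po.2)
          else if cell (i + k) (j + k) = -player then (po.1, po.2 + 1) else po) (0, 0)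
        (s.1 ++ [po.1], s.2 ++ [po.2])) s) s2
  -- negative diagonal windows
  let s4 : List Int × List Int :=
    (PySem.List.pyRange 3 (PySem.List.len board) 1).foldl (fun s i =>
      (PySem.List.pyRange 0 (cols - 3) 1).foldl (fun s j =>
        let po : Int × Int := (PySem.List.pyRange 0 4 1).foldl (fun po k =>
          if cell (i - k) (j + k) = player then (po.1 + 1, po.2)
          else if cell (i - k) (j + k) = -player then (po.1, po.2 + 1) else po) (0, 0)
        (s.1 ++ [po.1], s.2 ++ [po.2])) s) s3
  -- cancel filled windows (in-place num_in_wins_…[i] = 0; i comes from range(len), so i.toNat is exact)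
  let c : List Int × List Int :=
    (PySem.List.pyRange 0 (PySem.List.len s4.1) 1).foldl (fun c i =>
      if PySem.List.pyGetD c.1 i 0 + PySem.List.pyGetD c.2 i 0 = 4 then
        (c.1.set i.toNat 0, c.2.set i.toNat 0) else c) s4
  -- check for ruined wins
  (PySem.List.pyRange 0 (PySem.List.len c.1) 1).foldl (fun t i =>
    if PySem.List.pyGetD c.1 i 0 = 0 ∧ PySem.List.pyGetD c.2 i 0 = 0 then t
    else if PySem.List.pyGetD c.1 i 0 = 0 then (t.1, t.2 + 1)
    else if PySem.List.pyGetD c.2 i 0 = 0 then (t.1 + 1, t.2) else t) (0, 0)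

-- ===== PORT B =====
-- helper _drift_table of Source B; list indexing in it is in range under Pre_ (default never read)
def pvDriftTable (board : List (List Int)) (rows cols player di dj : Int) : List (List (Int × Int)) :=
  (PySem.List.pyRange 0 rows 1).foldl (fun tab i =>
    tab ++ [(PySem.List.pyRange 0 cols 1).foldl (fun row j =>
      let pi := i - di
      let pj := j - dj
      let po : Int × Int :=
        if 0 ≤ pi ∧ 0 ≤ pj ∧ pj < cols then
          (if pi = i then PySem.List.pyGetD row pj (0, 0)
           else PySem.List.pyGetD (PySem.List.pyGetD tab pi []) pj (0, 0))
        else (0, 0)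
      let v := PySem.List.pyGetD (PySem.List.pyGetD board i []) j 0
      row ++ [if v = player then (po.1 + 1, po.2)
              else if v = -player then (po.1, po.2 + 1) else po]) []]) []

def num_possible_wins_alt (board : List (List Int)) (player : Int) : Int × Int :=
  let rows : Int := PySem.List.len board
  let cols : Int := if rows ≠ 0 then PySem.List.len (PySem.List.pyGetD board 0 []) else 0
  ([((0 : Int), (1 : Int)), (1, 0), (1, 1), (1, -1)]).foldl (fun t d =>
    let tab := pvDriftTable board rows cols player d.1 d.2
    (PySem.List.pyRange 0 rows 1).foldl (fun t ei =>
      (PySem.List.pyRange 0 cols 1).foldl (fun t ej =>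
        let si := ei - 3 * d.1
        let sj := ej - 3 * d.2
        if 0 ≤ si ∧ si < rows ∧ 0 ≤ sj ∧ sj < cols then
          let po := PySem.List.pyGetD (PySem.List.pyGetD tab ei []) ej ((0 : Int), (0 : Int))
          let bi := ei - 4 * d.1
          let bj := ej - 4 * d.2
          let po2 : Int × Int :=
            if 0 ≤ bi ∧ 0 ≤ bj ∧ bj < cols then
              let bv := PySem.List.pyGetD (PySem.List.pyGetD tab bi []) bj ((0 : Int), (0 : Int))
              (po.1 - bv.1, po.2 - bv.2)
            else po
          if po2.2 = 0 ∧ 0 < po2.1 ∧ po2.1 < 4 then (t.1 + 1, t.2)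
          else if po2.1 = 0 ∧ 0 < po2.2 ∧ po2.2 < 4 then (t.1, t.2 + 1) else t
        else t) t) t) ((0 : Int), (0 : Int))

-- ===== PRECONDITION & SPEC =====
-- Pre_ excludes ragged boards in which some row is shorter than the first row: on those B's
-- table build reads every cell of the rectangle and raises IndexError, while A raises on most
-- of them too but happens to return (0, 0) on degenerate shapes its window loops never reach.
def Pre_num_possible_wins (board : List (List Int)) (player : Int) : Prop :=
  ∀ row ∈ board, (board.headD []).length ≤ row.length
instance (board : List (List Int)) (player : Int) : Decidable (Pre_num_possible_wins board player) := by unfold Pre_num_possible_wins; infer_instance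
def pvWitness_num_possible_wins : List (List Int) × Int := ([[1, 1, 0, -1], [0, 1, -1, 0]], 1)
def Spec_num_possible_wins (board : List (List Int)) (player : Int) (out : Int × Int) : Prop := out = num_possible_wins_alt board player
instance (board : List (List Int)) (player : Int) (out : Int × Int) : Decidable (Spec_num_possible_wins board player out) := by unfold Spec_num_possible_wins; infer_instance

-- ===== CLAIM (what is proved, stated in full; the proofs are below) =====
def Claim_equal_num_possible_wins : Prop := ∀ (board : List (List Int)) (player : Int), Dom_num_possible_wins board player → Pre_num_possible_wins board player → Spec_num_possible_wins board player (num_possible_wins board player)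

-- ===== LEMMAS AND PROOFS =====

theorem num_possible_wins_nil (p : Int) :
    num_possible_wins [] p = num_possible_wins_alt [] p := rfl

-- ---------- shared notions ----------

-- board[i][j] with default 0, as both ports read cells
def pvCell (b : List (List Int)) (i j : Int) : Int :=
  PySem.List.pyGetD (PySem.List.pyGetD b i []) j 0

def pvR (b : List (List Int)) : Int := PySem.List.len b
def pvC (b : List (List Int)) : Int := PySem.List.len (PySem.List.pyGetD b 0 [])

-- the four window-count functions, with exactly A's index expressions
def pvWinH (b : List (List Int)) (p i j : Int) : Int × Int :=
  (PySem.List.pyRange 0 4 1).foldl (fun po k =>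
    if pvCell b i (j + k) = p then (po.1 + 1, po.2)
    else if pvCell b i (j + k) = -p then (po.1, po.2 + 1) else po) (0, 0)
def pvWinV (b : List (List Int)) (p i j : Int) : Int × Int :=
  (PySem.List.pyRange 0 4 1).foldl (fun po k =>
    if pvCell b (i + k) j = p then (po.1 + 1, po.2)
    else if pvCell b (i + k) j = -p then (po.1, po.2 + 1) else po) (0, 0)
def pvWinD (b : List (List Int)) (p i j : Int) : Int × Int :=
  (PySem.List.pyRange 0 4 1).foldl (fun po k =>
    if pvCell b (i + k) (j + k) = p then (po.1 + 1, po.2)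
    else if pvCell b (i + k) (j + k) = -p then (po.1, po.2 + 1) else po) (0, 0)
def pvWinN (b : List (List Int)) (p i j : Int) : Int × Int :=
  (PySem.List.pyRange 0 4 1).foldl (fun po k =>
    if pvCell b (i - k) (j + k) = p then (po.1 + 1, po.2)
    else if pvCell b (i - k) (j + k) = -p then (po.1, po.2 + 1) else po) (0, 0)

-- per-window contributions to the two totals
def pvP (w : Int × Int) : Int := if w.2 = 0 ∧ 0 < w.1 ∧ w.1 < 4 then 1 else 0
def pvO (w : Int × Int) : Int := if w.1 = 0 ∧ 0 < w.2 ∧ w.2 < 4 then 1 else 0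

-- A's cancellation, per window
def pvCancel (w : Int × Int) : Int × Int := if w.1 + w.2 = 4 then (0, 0) else w

-- all windows A inspects, in A's order
def pvWinsList (b : List (List Int)) (p : Int) : List (Int × Int) :=
  ((PySem.List.pyRange 0 (pvR b) 1).flatMap fun i =>
    (PySem.List.pyRange 0 (pvC b - 3) 1).map fun j => pvWinH b p i j)
  ++ (((PySem.List.pyRange 0 (pvR b - 3) 1).flatMap fun i =>
    (PySem.List.pyRange 0 (pvC b) 1).map fun j => pvWinV b p i j)
  ++ (((PySem.List.pyRange 0 (pvR b - 3) 1).flatMap fun i =>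
    (PySem.List.pyRange 0 (pvC b - 3) 1).map fun j => pvWinD b p i j)
  ++ ((PySem.List.pyRange 3 (pvR b) 1).flatMap fun i =>
    (PySem.List.pyRange 0 (pvC b - 3) 1).map fun j => pvWinN b p i j)))

-- mirrors of A's phases (each definitionally a piece of the port)
def pvLoop (is js : List Int) (w : Int → Int → Int × Int) (s : List Int × List Int) :
    List Int × List Int :=
  is.foldl (fun s i => js.foldl (fun s j => (s.1 ++ [(w i j).1], s.2 ++ [(w i j).2])) s) s

def pvCancelRun (s : List Int × List Int) : List Int × List Int :=
  (PySem.List.pyRange 0 (PySem.List.len s.1) 1).foldl (fun c i =>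
    if PySem.List.pyGetD c.1 i 0 + PySem.List.pyGetD c.2 i 0 = 4 then
      (c.1.set i.toNat 0, c.2.set i.toNat 0) else c) s

def pvFinalRun (s : List Int × List Int) : Int × Int :=
  (PySem.List.pyRange 0 (PySem.List.len s.1) 1).foldl (fun t i =>
    if PySem.List.pyGetD s.1 i 0 = 0 ∧ PySem.List.pyGetD s.2 i 0 = 0 then t
    else if PySem.List.pyGetD s.1 i 0 = 0 then (t.1, t.2 + 1)
    else if PySem.List.pyGetD s.2 i 0 = 0 then (t.1 + 1, t.2) else t) (0, 0)

theorem pvA_shape (b : List (List Int)) (p : Int) :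
    num_possible_wins b p =
    pvFinalRun (pvCancelRun
      (pvLoop (PySem.List.pyRange 3 (pvR b) 1) (PySem.List.pyRange 0 (pvC b - 3) 1) (pvWinN b p)
        (pvLoop (PySem.List.pyRange 0 (pvR b - 3) 1) (PySem.List.pyRange 0 (pvC b - 3) 1) (pvWinD b p)
          (pvLoop (PySem.List.pyRange 0 (pvR b - 3) 1) (PySem.List.pyRange 0 (pvC b) 1) (pvWinV b p)
            (pvLoop (PySem.List.pyRange 0 (pvR b) 1) (PySem.List.pyRange 0 (pvC b - 3) 1) (pvWinH b p)
              ([], [])))))) := rfl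

theorem pvLoop_inner (js : List Int) (f : Int → Int × Int) (s : List Int × List Int) :
    js.foldl (fun s j => (s.1 ++ [(f j).1], s.2 ++ [(f j).2])) s
    = (s.1 ++ (js.map f).map Prod.fst, s.2 ++ (js.map f).map Prod.snd) := by
  induction js generalizing s with
  | nil => simp
  | cons a l ih => simp [ih]

theorem pvLoop_eq (is js : List Int) (w : Int → Int → Int × Int) (s : List Int × List Int) :
    pvLoop is js w s
    = (s.1 ++ ((is.flatMap fun i => js.map (w i)).map Prod.fst),
       s.2 ++ ((is.flatMap fun i => js.map (w i)).map Prod.snd)) := by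
  induction is generalizing s with
  | nil => simp [pvLoop]
  | cons a l ih =>
    show pvLoop l js w (js.foldl _ s) = _
    rw [pvLoop_inner js (w a) s, ih]
    simp

theorem pvGetD_len_append {α : Type} (l₁ l₂ : List α) (x d : α) (n : Nat) (h : l₁.length = n) :
    (l₁ ++ x :: l₂).getD n d = x := by
  subst h
  induction l₁ with
  | nil => simp
  | cons a t ih => simpa using ih

theorem pvSet_len_append (l₁ l₂ : List Int) (x v : Int) (n : Nat) (h : l₁.length = n) :
    (l₁ ++ x :: l₂).set n v = l₁ ++ v :: l₂ := by
  subst h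
  induction l₁ with
  | nil => simp
  | cons a t ih => simpa using ih

theorem pvCancel_body_eq (ws : List (Int × Int)) (n : Nat) (hn : n ≤ ws.length) :
    (PySem.List.pyRange 0 (n : Int) 1).foldl (fun c i =>
      if PySem.List.pyGetD c.1 i 0 + PySem.List.pyGetD c.2 i 0 = 4 then
        (c.1.set i.toNat 0, c.2.set i.toNat 0) else c)
      (ws.map Prod.fst, ws.map Prod.snd)
    = (((ws.take n).map pvCancel ++ ws.drop n).map Prod.fst,
       ((ws.take n).map pvCancel ++ ws.drop n).map Prod.snd) := by
  induction n with
  | zero => simp [PySem.List.pyRange_one_eq_nil]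
  | succ m ih =>
    have hm : m ≤ ws.length := Nat.le_of_succ_le hn
    have hlt : m < ws.length := hn
    rw [show ((m + 1 : Nat) : Int) = (m : Int) + 1 by push_cast; ring,
        PySem.List.pyRange_one_succ_right (by positivity), List.foldl_append,
        ih hm]
    have hdrop : ws.drop m = ws[m] :: ws.drop (m + 1) := by
      rw [List.drop_eq_getElem_cons hlt]
    rw [hdrop]
    simp only [List.foldl_cons, List.foldl_nil, List.map_append, List.map_cons]
    have h1 : (((ws.take m).map pvCancel).map Prod.fst).length = m := by
      simp [List.length_take]; omega
    have h2 : (((ws.take m).map pvCancel).map Prod.snd).length = m := by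
      simp [List.length_take]; omega
    rw [PySem.List.pyGetD_natCast, PySem.List.pyGetD_natCast,
        pvGetD_len_append _ _ _ _ _ h1, pvGetD_len_append _ _ _ _ _ h2]
    have htake : ws.take (m + 1) = ws.take m ++ [ws[m]] := by
      rw [List.take_succ]
      simp [List.getElem?_eq_getElem hlt]
    by_cases hc : ws[m].1 + ws[m].2 = 4
    · rw [if_pos hc]
      simp only [Int.toNat_natCast]
      rw [pvSet_len_append _ _ _ _ _ h1, pvSet_len_append _ _ _ _ _ h2, htake]
      simp [pvCancel, hc]
      refine ⟨?_, ?_⟩ <;>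
        · rw [List.take_succ]
          simp [List.getElem?_eq_getElem, hlt, pvCancel, hc]
    · rw [if_neg hc, htake]
      simp [pvCancel, hc]
      refine ⟨?_, ?_⟩ <;>
        · rw [List.take_succ]
          simp [List.getElem?_eq_getElem, hlt, pvCancel, hc]

theorem pvFinal_body_eq (ws : List (Int × Int)) (n : Nat) (hn : n ≤ ws.length) :
    (PySem.List.pyRange 0 (n : Int) 1).foldl (fun t i =>
      if PySem.List.pyGetD (ws.map Prod.fst) i 0 = 0 ∧ PySem.List.pyGetD (ws.map Prod.snd) i 0 = 0 then t
      else if PySem.List.pyGetD (ws.map Prod.fst) i 0 = 0 then (t.1, t.2 + 1)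
      else if PySem.List.pyGetD (ws.map Prod.snd) i 0 = 0 then (t.1 + 1, t.2) else t) ((0 : Int), (0 : Int))
    = (ws.take n).foldl (fun t w =>
        if w.1 = 0 ∧ w.2 = 0 then t
        else if w.1 = 0 then (t.1, t.2 + 1)
        else if w.2 = 0 then (t.1 + 1, t.2) else t) ((0 : Int), (0 : Int)) := by
  induction n with
  | zero => simp [PySem.List.pyRange_one_eq_nil]
  | succ m ih =>
    have hm : m ≤ ws.length := Nat.le_of_succ_le hn
    have hlt : m < ws.length := hn
    have htake : ws.take (m + 1) = ws.take m ++ [ws[m]] := by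
      rw [List.take_succ]
      simp [List.getElem?_eq_getElem hlt]
    rw [show ((m + 1 : Nat) : Int) = (m : Int) + 1 by push_cast; ring,
        PySem.List.pyRange_one_succ_right (by positivity), List.foldl_append,
        ih hm, htake, List.foldl_append]
    simp only [List.foldl_cons, List.foldl_nil]
    rw [PySem.List.pyGetD_natCast, PySem.List.pyGetD_natCast]
    have g1 : (ws.map Prod.fst).getD m 0 = ws[m].1 := by
      simp [List.getD_eq_getElem?_getD, hlt]
    have g2 : (ws.map Prod.snd).getD m 0 = ws[m].2 := by
      simp [List.getD_eq_getElem?_getD, hlt]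
    rw [g1, g2]

theorem pvFoldl_pair_add (l : List Int) (f g : Int → Int) (t : Int × Int) :
    l.foldl (fun t x => ((t.1 + f x, t.2 + g x) : Int × Int)) t
    = (t.1 + (l.map f).sum, t.2 + (l.map g).sum) := by
  induction l generalizing t with
  | nil => simp
  | cons a l ih =>
    simp only [List.foldl_cons, List.map_cons, List.sum_cons, ih]
    simp [add_assoc]

theorem pvFoldl_pair_add_pairs (l : List (Int × Int)) (f g : Int × Int → Int) (t : Int × Int) :
    l.foldl (fun t x => ((t.1 + f x, t.2 + g x) : Int × Int)) t
    = (t.1 + (l.map f).sum, t.2 + (l.map g).sum) := by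
  induction l generalizing t with
  | nil => simp
  | cons a l ih =>
    simp only [List.foldl_cons, List.map_cons, List.sum_cons, ih]
    simp [add_assoc]

theorem pvCls_fold (ws : List (Int × Int)) :
    ws.foldl (fun t w =>
        if w.1 = 0 ∧ w.2 = 0 then t
        else if w.1 = 0 then (t.1, t.2 + 1)
        else if w.2 = 0 then (t.1 + 1, t.2) else t) ((0 : Int), (0 : Int))
    = ((ws.map fun w => if w.1 ≠ 0 ∧ w.2 = 0 then (1 : Int) else 0).sum,
       (ws.map fun w => if w.1 = 0 ∧ w.2 ≠ 0 then (1 : Int) else 0).sum) := by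
  rw [PySem.List.foldl_congr_mem
    (g := fun t w => ((t.1 + if w.1 ≠ 0 ∧ w.2 = 0 then (1 : Int) else 0,
                       t.2 + if w.1 = 0 ∧ w.2 ≠ 0 then (1 : Int) else 0) : Int × Int))]
  · rw [pvFoldl_pair_add_pairs]; simp
  · intro acc w _
    rcases acc with ⟨a1, a2⟩
    split_ifs <;> simp_all <;> omega

-- window bounds
theorem pvWinfold_bounds (l : List Int) (c : Int → Int) (p : Int) (po : Int × Int) :
    po.1 ≤ (l.foldl (fun po k =>
        if c k = p then (po.1 + 1, po.2)
        else if c k = -p then (po.1, po.2 + 1) else po) po).1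
    ∧ po.2 ≤ (l.foldl (fun po k =>
        if c k = p then (po.1 + 1, po.2)
        else if c k = -p then (po.1, po.2 + 1) else po) po).2
    ∧ (l.foldl (fun po k =>
        if c k = p then (po.1 + 1, po.2)
        else if c k = -p then (po.1, po.2 + 1) else po) po).1
      + (l.foldl (fun po k =>
        if c k = p then (po.1 + 1, po.2)
        else if c k = -p then (po.1, po.2 + 1) else po) po).2
      ≤ po.1 + po.2 + l.length := by
  induction l generalizing po with
  | nil => simp
  | cons a l ih =>
    simp only [List.foldl_cons, List.length_cons]
    split_ifs with h1 h2
    · have := ih (po.1 + 1, po.2); push_cast at *; constructor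
      · exact le_trans (by omega) this.1
      · exact ⟨le_trans (le_refl _) this.2.1, by omega⟩
    · have := ih (po.1, po.2 + 1); push_cast at *; constructor
      · exact le_trans (le_refl _) this.1
      · exact ⟨le_trans (by omega) this.2.1, by omega⟩
    · have := ih po; push_cast at *; exact ⟨this.1, this.2.1, by omega⟩

theorem pvLen_range4 : (PySem.List.pyRange 0 4 1).length = 4 := by decide

theorem pvWin_bounds {b : List (List Int)} {p : Int} (w : Int × Int)
    (h : w ∈ pvWinsList b p) : 0 ≤ w.1 ∧ 0 ≤ w.2 ∧ w.1 + w.2 ≤ 4 := by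
  have key : ∀ (c : Int → Int),
      0 ≤ ((PySem.List.pyRange 0 4 1).foldl (fun po k =>
        if c k = p then (po.1 + 1, po.2)
        else if c k = -p then (po.1, po.2 + 1) else po) ((0 : Int), (0 : Int))).1
    ∧ 0 ≤ ((PySem.List.pyRange 0 4 1).foldl (fun po k =>
        if c k = p then (po.1 + 1, po.2)
        else if c k = -p then (po.1, po.2 + 1) else po) ((0 : Int), (0 : Int))).2
    ∧ ((PySem.List.pyRange 0 4 1).foldl (fun po k =>
        if c k = p then (po.1 + 1, po.2)
        else if c k = -p then (po.1, po.2 + 1) else po) ((0 : Int), (0 : Int))).1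
      + ((PySem.List.pyRange 0 4 1).foldl (fun po k =>
        if c k = p then (po.1 + 1, po.2)
        else if c k = -p then (po.1, po.2 + 1) else po) ((0 : Int), (0 : Int))).2 ≤ 4 := by
    intro c
    have := pvWinfold_bounds (PySem.List.pyRange 0 4 1) c p (0, 0)
    rw [pvLen_range4] at this
    simpa using this
  simp only [pvWinsList, List.mem_append, List.mem_flatMap, List.mem_map] at h
  rcases h with ⟨i, _, j, _, rfl⟩ | ⟨⟨i, _, j, _, rfl⟩ | ⟨⟨i, _, j, _, rfl⟩ | ⟨i, _, j, _, rfl⟩⟩⟩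
  · exact key (fun k => pvCell b i (j + k))
  · exact key (fun k => pvCell b (i + k) j)
  · exact key (fun k => pvCell b (i + k) (j + k))
  · exact key (fun k => pvCell b (i - k) (j + k))

-- the cancelled-then-classified contribution is the direct contribution
theorem pvCls_cancel1 (w : Int × Int) (h1 : 0 ≤ w.1) (h2 : 0 ≤ w.2) (h3 : w.1 + w.2 ≤ 4) :
    (if (pvCancel w).1 ≠ 0 ∧ (pvCancel w).2 = 0 then (1 : Int) else 0) = pvP w := by
  rcases w with ⟨a, c⟩
  simp only [pvCancel, pvP]
  split_ifs <;> simp_all <;> omega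

theorem pvCls_cancel2 (w : Int × Int) (h1 : 0 ≤ w.1) (h2 : 0 ≤ w.2) (h3 : w.1 + w.2 ≤ 4) :
    (if (pvCancel w).1 = 0 ∧ (pvCancel w).2 ≠ 0 then (1 : Int) else 0) = pvO w := by
  rcases w with ⟨a, c⟩
  simp only [pvCancel, pvO]
  split_ifs <;> simp_all <;> omega

theorem pvSum_flatMap (l : List Int) (g : Int → List (Int × Int)) (F : Int × Int → Int) :
    ((l.flatMap g).map F).sum = (l.map fun x => ((g x).map F).sum).sum := by
  induction l with
  | nil => simp
  | cons a l ih => simp [ih]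

-- the common normal form: per-window contribution sums over A's four index ranges
def pvNF (b : List (List Int)) (p : Int) : Int × Int :=
  (((PySem.List.pyRange 0 (pvR b) 1).map fun i =>
      ((PySem.List.pyRange 0 (pvC b - 3) 1).map fun j => pvP (pvWinH b p i j)).sum).sum
   + ((((PySem.List.pyRange 0 (pvR b - 3) 1).map fun i =>
      ((PySem.List.pyRange 0 (pvC b) 1).map fun j => pvP (pvWinV b p i j)).sum).sum)
   + ((((PySem.List.pyRange 0 (pvR b - 3) 1).map fun i =>
      ((PySem.List.pyRange 0 (pvC b - 3) 1).map fun j => pvP (pvWinD b p i j)).sum).sum)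
   + (((PySem.List.pyRange 3 (pvR b) 1).map fun i =>
      ((PySem.List.pyRange 0 (pvC b - 3) 1).map fun j => pvP (pvWinN b p i j)).sum).sum))),
   ((PySem.List.pyRange 0 (pvR b) 1).map fun i =>
      ((PySem.List.pyRange 0 (pvC b - 3) 1).map fun j => pvO (pvWinH b p i j)).sum).sum
   + ((((PySem.List.pyRange 0 (pvR b - 3) 1).map fun i =>
      ((PySem.List.pyRange 0 (pvC b) 1).map fun j => pvO (pvWinV b p i j)).sum).sum)
   + ((((PySem.List.pyRange 0 (pvR b - 3) 1).map fun i =>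
      ((PySem.List.pyRange 0 (pvC b - 3) 1).map fun j => pvO (pvWinD b p i j)).sum).sum)
   + (((PySem.List.pyRange 3 (pvR b) 1).map fun i =>
      ((PySem.List.pyRange 0 (pvC b - 3) 1).map fun j => pvO (pvWinN b p i j)).sum).sum))))

-- A's port equals the direct per-window contribution sums
theorem pvA_eq (b : List (List Int)) (p : Int) :
    num_possible_wins b p = pvNF b p := by
  rw [pvA_shape]
  have hlist :
      (pvLoop (PySem.List.pyRange 3 (pvR b) 1) (PySem.List.pyRange 0 (pvC b - 3) 1) (pvWinN b p)
        (pvLoop (PySem.List.pyRange 0 (pvR b - 3) 1) (PySem.List.pyRange 0 (pvC b - 3) 1) (pvWinD b p)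
          (pvLoop (PySem.List.pyRange 0 (pvR b - 3) 1) (PySem.List.pyRange 0 (pvC b) 1) (pvWinV b p)
            (pvLoop (PySem.List.pyRange 0 (pvR b) 1) (PySem.List.pyRange 0 (pvC b - 3) 1) (pvWinH b p)
              ([], [])))))
      = ((pvWinsList b p).map Prod.fst, (pvWinsList b p).map Prod.snd) := by
    simp [pvLoop_eq, pvWinsList]
  rw [hlist]
  have hcancel : pvCancelRun ((pvWinsList b p).map Prod.fst, (pvWinsList b p).map Prod.snd)
      = (((pvWinsList b p).map pvCancel).map Prod.fst,
         ((pvWinsList b p).map pvCancel).map Prod.snd) := by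
    unfold pvCancelRun
    have hb : PySem.List.len ((pvWinsList b p).map Prod.fst) = ((pvWinsList b p).length : Int) := by
      simp
    rw [hb]
    have := pvCancel_body_eq (pvWinsList b p) (pvWinsList b p).length (le_refl _)
    simpa using this
  rw [hcancel]
  have hfinal : pvFinalRun (((pvWinsList b p).map pvCancel).map Prod.fst,
         ((pvWinsList b p).map pvCancel).map Prod.snd)
      = ((((pvWinsList b p).map pvCancel).map fun w => if w.1 ≠ 0 ∧ w.2 = 0 then (1 : Int) else 0).sum,
         (((pvWinsList b p).map pvCancel).map fun w => if w.1 = 0 ∧ w.2 ≠ 0 then (1 : Int) else 0).sum) := by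
    unfold pvFinalRun
    have hb : PySem.List.len (((pvWinsList b p).map pvCancel).map Prod.fst)
        = ((((pvWinsList b p).map pvCancel)).length : Int) := by simp
    rw [hb]
    have := pvFinal_body_eq ((pvWinsList b p).map pvCancel) ((pvWinsList b p).map pvCancel).length (le_refl _)
    rw [List.take_length] at this
    rw [this, pvCls_fold]
  rw [hfinal]
  have hmap1 : (((pvWinsList b p).map pvCancel).map fun w => if w.1 ≠ 0 ∧ w.2 = 0 then (1 : Int) else 0)
      = (pvWinsList b p).map pvP := by
    rw [List.map_map]
    apply List.map_congr_left
    intro w hw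
    have hbd := pvWin_bounds w hw
    exact pvCls_cancel1 w hbd.1 hbd.2.1 hbd.2.2
  have hmap2 : (((pvWinsList b p).map pvCancel).map fun w => if w.1 = 0 ∧ w.2 ≠ 0 then (1 : Int) else 0)
      = (pvWinsList b p).map pvO := by
    rw [List.map_map]
    apply List.map_congr_left
    intro w hw
    have hbd := pvWin_bounds w hw
    exact pvCls_cancel2 w hbd.1 hbd.2.1 hbd.2.2
  rw [hmap1, hmap2]
  simp only [pvNF, pvWinsList, List.map_append, List.sum_append, pvSum_flatMap, List.map_map,
    Function.comp_def]

-- ---------- B side: DP-table characterization and loop assembly ----------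

def pvRN (b : List (List Int)) : Nat := b.length

def pvCN (b : List (List Int)) : Nat := (b.getD 0 []).length

theorem pvR_eq (b : List (List Int)) : pvR b = (pvRN b : Int) := by
  simp [pvR, pvRN]

theorem pvC_eq (b : List (List Int)) : pvC b = (pvCN b : Int) := by
  simp [pvC, pvCN, PySem.List.pyGetD_zero]

def pvClsI (b : List (List Int)) (p i j : Int) : Int × Int :=
  if pvCell b i j = p then (1, 0) else if pvCell b i j = -p then (0, 1) else 0

theorem pvStepCls (p v : Int) (po : Int × Int) :
    (if v = p then (po.1 + 1, po.2) else if v = -p then (po.1, po.2 + 1) else po)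
    = po + (if v = p then ((1 : Int), (0 : Int)) else if v = -p then (0, 1) else 0) := by
  split_ifs <;> simp [Prod.ext_iff]

def pvEH (b : List (List Int)) (p : Int) (i : Nat) : Nat → Int × Int
  | 0 => pvClsI b p i 0
  | j + 1 => pvEH b p i j + pvClsI b p i (j + 1)

def pvEV (b : List (List Int)) (p : Int) : Nat → Nat → Int × Int
  | 0, j => pvClsI b p 0 j
  | i + 1, j => pvEV b p i j + pvClsI b p (i + 1) j

def pvED (b : List (List Int)) (p : Int) : Nat → Nat → Int × Int
  | 0, j => pvClsI b p 0 j
  | i + 1, 0 => pvClsI b p (i + 1) 0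
  | i + 1, j + 1 => pvED b p i j + pvClsI b p (i + 1) (j + 1)

def pvEN (b : List (List Int)) (p : Int) (C : Nat) : Nat → Nat → Int × Int
  | 0, j => pvClsI b p 0 j
  | i + 1, j => (if j + 1 < C then pvEN b p C i (j + 1) else 0) + pvClsI b p (i + 1) j

def pvRowB (b : List (List Int)) (cols p di dj : Int) (tab : List (List (Int × Int))) (i : Int) :
    List (Int × Int) :=
  (PySem.List.pyRange 0 cols 1).foldl (fun row j =>
    let pi := i - di
    let pj := j - dj
    let po : Int × Int :=
      if 0 ≤ pi ∧ 0 ≤ pj ∧ pj < cols then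
        (if pi = i then PySem.List.pyGetD row pj (0, 0)
         else PySem.List.pyGetD (PySem.List.pyGetD tab pi []) pj (0, 0))
      else (0, 0)
    let v := PySem.List.pyGetD (PySem.List.pyGetD b i []) j 0
    row ++ [if v = p then (po.1 + 1, po.2)
            else if v = -p then (po.1, po.2 + 1) else po]) []

def pvTabN (b : List (List Int)) (cols p di dj : Int) : Nat → List (List (Int × Int))
  | 0 => []
  | m + 1 => pvTabN b cols p di dj m
      ++ [pvRowB b cols p di dj (pvTabN b cols p di dj m) (m : Int)]

theorem pvDriftTable_eq (b : List (List Int)) (cols p di dj : Int) (m : Nat) :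
    pvDriftTable b (m : Int) cols p di dj = pvTabN b cols p di dj m := by
  induction m with
  | zero =>
    simp [pvDriftTable, pvTabN, PySem.List.pyRange_one_eq_nil]
  | succ m ih =>
    unfold pvDriftTable at ih ⊢
    rw [show ((m + 1 : Nat) : Int) = (m : Int) + 1 by push_cast; ring,
        PySem.List.pyRange_one_succ_right (by positivity), List.foldl_append, ih]
    rfl

theorem pvTabN_length (b : List (List Int)) (cols p di dj : Int) (m : Nat) :
    (pvTabN b cols p di dj m).length = m := by
  induction m with
  | zero => rfl
  | succ m ih => simp [pvTabN, ih]

theorem pvTabN_get (b : List (List Int)) (cols p di dj : Int) :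
    ∀ {m i : Nat}, i < m →
    (pvTabN b cols p di dj m).getD i [] =
      pvRowB b cols p di dj (pvTabN b cols p di dj i) (i : Int) := by
  intro m
  induction m with
  | zero => intro i h; exact absurd h (Nat.not_lt_zero i)
  | succ m ih =>
    intro i h
    rcases Nat.lt_succ_iff_lt_or_eq.mp h with h' | rfl
    · rw [pvTabN, List.getD_append _ _ _ _ (by rw [pvTabN_length]; exact h')]
      exact ih h'
    · rw [pvTabN]
      exact pvGetD_len_append _ _ _ _ _ (pvTabN_length b cols p di dj i)

theorem pvStep_plain (w t : Int × Int) :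
    (if w.2 = 0 ∧ 0 < w.1 ∧ w.1 < 4 then ((t.1 + 1, t.2) : Int × Int)
     else if w.1 = 0 ∧ 0 < w.2 ∧ w.2 < 4 then (t.1, t.2 + 1) else t)
    = (t.1 + pvP w, t.2 + pvO w) := by
  simp only [pvP, pvO]
  split_ifs <;> simp [Prod.ext_iff] <;> omega

theorem pvSum_ite_const (c : Prop) [Decidable c] (l : List Int) (g : Int → Int) :
    (l.map fun x => if c then g x else 0).sum = if c then (l.map g).sum else 0 := by
  by_cases h : c <;> simp [h]

theorem pvSum_trunc (C : Int) (g : Int → Int) :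
    ((PySem.List.pyRange 0 C 1).map fun j => if j + 3 < C then g j else 0).sum
    = ((PySem.List.pyRange 0 (C - 3) 1).map g).sum := by
  rcases le_or_gt C 3 with h | h
  · rw [PySem.List.pyRange_one_eq_nil (show C - 3 ≤ 0 by omega)]
    simp only [List.map_nil, List.sum_nil]
    apply List.sum_eq_zero
    intro x hx
    simp only [List.mem_map] at hx
    rcases hx with ⟨j, hj, rfl⟩
    rw [PySem.List.mem_pyRange_one] at hj
    rw [if_neg (by omega)]
  · rw [PySem.List.pyRange_one_append 0 (C - 3) C (by omega) (by omega), List.map_append,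
      List.sum_append]
    have e1 : ((PySem.List.pyRange 0 (C - 3) 1).map fun j => if j + 3 < C then g j else 0)
        = (PySem.List.pyRange 0 (C - 3) 1).map g := by
      apply List.map_congr_left
      intro j hj
      rw [PySem.List.mem_pyRange_one] at hj
      rw [if_pos (by omega)]
    have e2 : ((PySem.List.pyRange (C - 3) C 1).map fun j => if j + 3 < C then g j else 0).sum = 0 := by
      apply List.sum_eq_zero
      intro x hx
      simp only [List.mem_map] at hx
      rcases hx with ⟨j, hj, rfl⟩
      rw [PySem.List.mem_pyRange_one] at hj
      rw [if_neg (by omega)]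
    rw [e1, e2, add_zero]

theorem pvSum_lower (R : Int) (g : Int → Int) :
    ((PySem.List.pyRange 0 R 1).map fun i => if 3 ≤ i then g i else 0).sum
    = ((PySem.List.pyRange 3 R 1).map g).sum := by
  rcases le_or_gt R 3 with h | h
  · rw [PySem.List.pyRange_one_eq_nil (show R ≤ 3 from h)]
    simp only [List.map_nil, List.sum_nil]
    apply List.sum_eq_zero
    intro x hx
    simp only [List.mem_map] at hx
    rcases hx with ⟨i, hi, rfl⟩
    rw [PySem.List.mem_pyRange_one] at hi
    rw [if_neg (by omega)]
  · rw [PySem.List.pyRange_one_append 0 3 R (by omega) (by omega), List.map_append, List.sum_append]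
    have e1 : ((PySem.List.pyRange 0 3 1).map fun i => if 3 ≤ i then g i else 0).sum = 0 := by
      apply List.sum_eq_zero
      intro x hx
      simp only [List.mem_map] at hx
      rcases hx with ⟨i, hi, rfl⟩
      rw [PySem.List.mem_pyRange_one] at hi
      rw [if_neg (by omega)]
    have e2 : ((PySem.List.pyRange 3 R 1).map fun i => if 3 ≤ i then g i else 0)
        = (PySem.List.pyRange 3 R 1).map g := by
      apply List.map_congr_left
      intro i hi
      rw [PySem.List.mem_pyRange_one] at hi
      rw [if_pos (by omega)]
    rw [e1, e2, zero_add]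

theorem pvSum_shift3 (C : Int) (g : Int → Int) :
    ((PySem.List.pyRange 0 C 1).map fun x => if 3 ≤ x then g (x - 3) else 0).sum
    = ((PySem.List.pyRange 0 (C - 3) 1).map g).sum := by
  rw [pvSum_lower C (fun x => g (x - 3))]
  simp only [PySem.List.pyRange_one, List.map_map]
  have hb : C - 3 - 0 = C - 3 := by ring
  rw [hb]
  refine congrArg List.sum ?_
  apply List.map_congr_left
  intro k _
  simp only [Function.comp_apply]
  exact congrArg g (by omega)

def pvBDir (b : List (List Int)) (p rows cols : Int) (d : Int × Int) (t : Int × Int) : Int × Int :=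
  (PySem.List.pyRange 0 rows 1).foldl (fun t ei =>
    (PySem.List.pyRange 0 cols 1).foldl (fun t ej =>
      let si := ei - 3 * d.1
      let sj := ej - 3 * d.2
      if 0 ≤ si ∧ si < rows ∧ 0 ≤ sj ∧ sj < cols then
        let po := PySem.List.pyGetD
          (PySem.List.pyGetD (pvDriftTable b rows cols p d.1 d.2) ei []) ej ((0 : Int), (0 : Int))
        let bi := ei - 4 * d.1
        let bj := ej - 4 * d.2
        let po2 : Int × Int :=
          if 0 ≤ bi ∧ 0 ≤ bj ∧ bj < cols then
            let bv := PySem.List.pyGetD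
              (PySem.List.pyGetD (pvDriftTable b rows cols p d.1 d.2) bi []) bj ((0 : Int), (0 : Int))
            (po.1 - bv.1, po.2 - bv.2)
          else po
        if po2.2 = 0 ∧ 0 < po2.1 ∧ po2.1 < 4 then (t.1 + 1, t.2)
        else if po2.1 = 0 ∧ 0 < po2.2 ∧ po2.2 < 4 then (t.1, t.2 + 1) else t
      else t) t) t

theorem pvGetD_map_pyRange_zero' {α : Type} (C : Nat) (j : Nat) (hj : j < C) (f : Int → α) (d : α) :
    ((PySem.List.pyRange 0 (C : Int) 1).map f).getD j d = f (j : Int) := by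
  rw [List.getD_eq_getElem?_getD, PySem.List.getElem?_map_pyRange_zero f C j hj]
  rfl

theorem pvGetD_map_range {α : Type} (n j : Nat) (hj : j < n) (f : Nat → α) (d : α) :
    ((List.range n).map f).getD j d = f j := by
  rw [List.getD_eq_getElem?_getD]
  simp [List.getElem?_range, hj]

theorem pvRowB_prev (b : List (List Int)) (cols p dj : Int) (tab : List (List (Int × Int)))
    (i : Int) :
    pvRowB b cols p 1 dj tab i = (PySem.List.pyRange 0 cols 1).map (fun j =>
      (if 0 ≤ i - 1 ∧ 0 ≤ j - dj ∧ j - dj < cols then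
         PySem.List.pyGetD (PySem.List.pyGetD tab (i - 1) []) (j - dj) (0, 0)
       else (0, 0))
      + pvClsI b p i j) := by
  unfold pvRowB
  rw [PySem.List.foldl_congr_mem (g := fun row j => row ++
      [(if 0 ≤ i - 1 ∧ 0 ≤ j - dj ∧ j - dj < cols then
          PySem.List.pyGetD (PySem.List.pyGetD tab (i - 1) []) (j - dj) (0, 0)
        else (0, 0)) + pvClsI b p i j])]
  · rw [PySem.List.foldl_append_singleton_eq_map]
    simp
  · intro row j _
    simp only [pvStepCls]
    rw [if_neg (show ¬ (i - 1 = i) by omega)]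
    rfl

theorem pvRow_get_V (b : List (List Int)) (p : Int) (C : Nat) :
    ∀ (i : Nat), ∀ (j : Nat), j < C →
    (pvRowB b (C : Int) p 1 0 (pvTabN b (C : Int) p 1 0 i) (i : Int)).getD j (0, 0)
      = pvEV b p i j := by
  intro i
  induction i with
  | zero =>
    intro j hj
    rw [pvRowB_prev, pvGetD_map_pyRange_zero' C j hj]
    rw [if_neg (by omega)]
    simp [pvEV]
  | succ i ih =>
    intro j hj
    rw [pvRowB_prev, pvGetD_map_pyRange_zero' C j hj]
    rw [if_pos ⟨by omega, by omega, by omega⟩]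
    rw [show ((i + 1 : Nat) : Int) - 1 = (i : Int) by push_cast; ring,
        show (j : Int) - 0 = (j : Int) by ring]
    rw [PySem.List.pyGetD_natCast, PySem.List.pyGetD_natCast,
        pvTabN_get _ _ _ _ _ (Nat.lt_succ_self i), ih j hj]
    rfl

theorem pvRow_get_D (b : List (List Int)) (p : Int) (C : Nat) :
    ∀ (i : Nat), ∀ (j : Nat), j < C →
    (pvRowB b (C : Int) p 1 1 (pvTabN b (C : Int) p 1 1 i) (i : Int)).getD j (0, 0)
      = pvED b p i j := by
  intro i
  induction i with
  | zero =>
    intro j hj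
    rw [pvRowB_prev, pvGetD_map_pyRange_zero' C j hj]
    rw [if_neg (by omega)]
    simp [pvED]
  | succ i ih =>
    intro j hj
    rw [pvRowB_prev, pvGetD_map_pyRange_zero' C j hj]
    cases j with
    | zero =>
      rw [if_neg (by omega)]
      simp [pvED]
    | succ n =>
      rw [if_pos ⟨by omega, by omega, by omega⟩]
      rw [show ((i + 1 : Nat) : Int) - 1 = (i : Int) by push_cast; ring,
          show ((n + 1 : Nat) : Int) - 1 = (n : Int) by push_cast; ring]
      rw [PySem.List.pyGetD_natCast, PySem.List.pyGetD_natCast,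
          pvTabN_get _ _ _ _ _ (Nat.lt_succ_self i), ih n (by omega)]
      rfl

theorem pvRow_get_N (b : List (List Int)) (p : Int) (C : Nat) :
    ∀ (i : Nat), ∀ (j : Nat), j < C →
    (pvRowB b (C : Int) p 1 (-1) (pvTabN b (C : Int) p 1 (-1) i) (i : Int)).getD j (0, 0)
      = pvEN b p C i j := by
  intro i
  induction i with
  | zero =>
    intro j hj
    rw [pvRowB_prev, pvGetD_map_pyRange_zero' C j hj]
    rw [if_neg (by omega)]
    simp [pvEN]
  | succ i ih =>
    intro j hj
    rw [pvRowB_prev, pvGetD_map_pyRange_zero' C j hj]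
    by_cases hc : j + 1 < C
    · rw [if_pos ⟨by omega, by omega, by omega⟩]
      rw [show ((i + 1 : Nat) : Int) - 1 = (i : Int) by push_cast; ring,
          show (j : Int) - (-1) = ((j + 1 : Nat) : Int) by push_cast; ring]
      rw [PySem.List.pyGetD_natCast, PySem.List.pyGetD_natCast,
          pvTabN_get _ _ _ _ _ (Nat.lt_succ_self i), ih (j + 1) hc]
      simp [pvEN, hc]
    · rw [if_neg (by omega)]
      simp [pvEN, hc]

theorem pvRow_get_H (b : List (List Int)) (p : Int) (C : Nat)
    (tab : List (List (Int × Int))) (i : Nat) :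
    ∀ (j : Nat), j < C →
    (pvRowB b (C : Int) p 0 1 tab (i : Int)).getD j (0, 0) = pvEH b p i j := by
  suffices h : ∀ m : Nat, m ≤ C →
      (PySem.List.pyRange 0 (m : Int) 1).foldl
        (fun row j =>
          let pi := (i : Int) - 0
          let pj := j - 1
          let po : Int × Int :=
            if 0 ≤ pi ∧ 0 ≤ pj ∧ pj < (C : Int) then
              (if pi = (i : Int) then PySem.List.pyGetD row pj (0, 0)
               else PySem.List.pyGetD (PySem.List.pyGetD tab pi []) pj (0, 0))
            else (0, 0)
          let v := PySem.List.pyGetD (PySem.List.pyGetD b (i : Int) []) j 0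
          row ++ [if v = p then (po.1 + 1, po.2)
                  else if v = -p then (po.1, po.2 + 1) else po]) []
      = (List.range m).map (fun j => pvEH b p i j) by
    intro j hj
    unfold pvRowB
    rw [h C le_rfl, List.getD_eq_getElem?_getD]
    simp [List.getElem?_range, hj]
  intro m
  induction m with
  | zero => intro _; simp [PySem.List.pyRange_one_eq_nil]
  | succ m ih =>
    intro hm
    rw [show ((m + 1 : Nat) : Int) = (m : Int) + 1 by push_cast; ring,
        PySem.List.pyRange_one_succ_right (by positivity), List.foldl_append, ih (by omega)]
    simp only [List.foldl_cons, List.foldl_nil, List.range_succ, List.map_append, List.map_cons,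
      List.map_nil]
    congr 1
    have hz : ((0, 0) : Int × Int) = 0 := rfl
    simp only [pvStepCls, sub_zero]
    cases m with
    | zero =>
      rw [if_neg (by omega)]
      simp [hz, pvEH, pvClsI, pvCell]
    | succ n =>
      rw [show ((n + 1 : Nat) : Int) - 1 = (n : Int) by push_cast; ring]
      rw [if_pos ⟨by omega, by omega, by omega⟩]
      simp only [eq_self_iff_true, if_true]
      rw [PySem.List.pyGetD_natCast, pvGetD_map_range (n + 1) n (by omega)]
      simp [pvEH, pvClsI, pvCell]

-- window sums

theorem pvWinH_sum (b : List (List Int)) (p i j : Int) :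
    pvWinH b p i j = pvClsI b p i j + pvClsI b p i (j + 1) + pvClsI b p i (j + 2) + pvClsI b p i (j + 3) := by
  have h4 : PySem.List.pyRange 0 4 1 = [0, 1, 2, 3] := by decide
  have hz : ((0, 0) : Int × Int) = 0 := rfl
  simp only [pvWinH, h4, List.foldl_cons, List.foldl_nil, pvStepCls, hz, zero_add]
  rw [show j + (0 : Int) = j by ring]
  simp only [pvClsI]

theorem pvWinV_sum (b : List (List Int)) (p i j : Int) :
    pvWinV b p i j = pvClsI b p i j + pvClsI b p (i + 1) j + pvClsI b p (i + 2) j + pvClsI b p (i + 3) j := by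
  have h4 : PySem.List.pyRange 0 4 1 = [0, 1, 2, 3] := by decide
  have hz : ((0, 0) : Int × Int) = 0 := rfl
  simp only [pvWinV, h4, List.foldl_cons, List.foldl_nil, pvStepCls, hz, zero_add]
  rw [show i + (0 : Int) = i by ring]
  simp only [pvClsI]

theorem pvWinD_sum (b : List (List Int)) (p i j : Int) :
    pvWinD b p i j = pvClsI b p i j + pvClsI b p (i + 1) (j + 1) + pvClsI b p (i + 2) (j + 2)
      + pvClsI b p (i + 3) (j + 3) := by
  have h4 : PySem.List.pyRange 0 4 1 = [0, 1, 2, 3] := by decide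
  have hz : ((0, 0) : Int × Int) = 0 := rfl
  simp only [pvWinD, h4, List.foldl_cons, List.foldl_nil, pvStepCls, hz, zero_add]
  rw [show i + (0 : Int) = i by ring, show j + (0 : Int) = j by ring]
  simp only [pvClsI]

theorem pvWinN_sum (b : List (List Int)) (p i j : Int) :
    pvWinN b p i j = pvClsI b p i j + pvClsI b p (i - 1) (j + 1) + pvClsI b p (i - 2) (j + 2)
      + pvClsI b p (i - 3) (j + 3) := by
  have h4 : PySem.List.pyRange 0 4 1 = [0, 1, 2, 3] := by decide
  have hz : ((0, 0) : Int × Int) = 0 := rfl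
  simp only [pvWinN, h4, List.foldl_cons, List.foldl_nil, pvStepCls, hz, zero_add]
  rw [show i - (0 : Int) = i by ring, show j + (0 : Int) = j by ring]
  simp only [pvClsI]

-- table-difference window lemmas

theorem pvEH_win (b : List (List Int)) (p : Int) (i j : Nat) :
    pvEH b p i (j + 3) = (if 1 ≤ j then pvEH b p i (j - 1) else 0) + pvWinH b p i j := by
  rw [pvWinH_sum]
  cases j with
  | zero =>
    rw [if_neg (by omega), zero_add]
    have e : pvEH b p i (0 + 3) = pvClsI b p i 0 + pvClsI b p i 1 + pvClsI b p i 2 + pvClsI b p i 3 := rfl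
    rw [e]
    push_cast
    all_goals norm_num
  | succ m =>
    rw [if_pos (by omega), Nat.add_sub_cancel]
    have e1 : pvEH b p i (m + 1 + 3) = pvEH b p i (m + 3) + pvClsI b p i ((m + 4 : Nat) : Int) := rfl
    have e2 : pvEH b p i (m + 3) = pvEH b p i (m + 2) + pvClsI b p i ((m + 3 : Nat) : Int) := rfl
    have e3 : pvEH b p i (m + 2) = pvEH b p i (m + 1) + pvClsI b p i ((m + 2 : Nat) : Int) := rfl
    have e4 : pvEH b p i (m + 1) = pvEH b p i m + pvClsI b p i ((m + 1 : Nat) : Int) := rfl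
    rw [e1, e2, e3, e4]
    push_cast
    ring_nf

theorem pvEV_win (b : List (List Int)) (p : Int) (i j : Nat) :
    pvEV b p (i + 3) j = (if 1 ≤ i then pvEV b p (i - 1) j else 0) + pvWinV b p i j := by
  rw [pvWinV_sum]
  cases i with
  | zero =>
    rw [if_neg (by omega), zero_add]
    have e : pvEV b p (0 + 3) j = pvClsI b p 0 j + pvClsI b p 1 j + pvClsI b p 2 j + pvClsI b p 3 j := rfl
    rw [e]
    push_cast
    all_goals norm_num
  | succ m =>
    rw [if_pos (by omega), Nat.add_sub_cancel]
    have e1 : pvEV b p (m + 1 + 3) j = pvEV b p (m + 3) j + pvClsI b p ((m + 4 : Nat) : Int) j := rfl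
    have e2 : pvEV b p (m + 3) j = pvEV b p (m + 2) j + pvClsI b p ((m + 3 : Nat) : Int) j := rfl
    have e3 : pvEV b p (m + 2) j = pvEV b p (m + 1) j + pvClsI b p ((m + 2 : Nat) : Int) j := rfl
    have e4 : pvEV b p (m + 1) j = pvEV b p m j + pvClsI b p ((m + 1 : Nat) : Int) j := rfl
    rw [e1, e2, e3, e4]
    push_cast
    ring_nf

theorem pvED_win (b : List (List Int)) (p : Int) (i j : Nat) :
    pvED b p (i + 3) (j + 3) = (if 1 ≤ i ∧ 1 ≤ j then pvED b p (i - 1) (j - 1) else 0)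
      + pvWinD b p i j := by
  rw [pvWinD_sum]
  cases i with
  | zero =>
    rw [if_neg (by omega), zero_add]
    have a1 : pvED b p 3 (j + 3) = pvED b p 2 (j + 2) + pvClsI b p 3 ((j + 3 : Nat) : Int) := rfl
    have a2 : pvED b p 2 (j + 2) = pvED b p 1 (j + 1) + pvClsI b p 2 ((j + 2 : Nat) : Int) := rfl
    have a3 : pvED b p 1 (j + 1) = pvED b p 0 j + pvClsI b p 1 ((j + 1 : Nat) : Int) := rfl
    have a4 : pvED b p 0 j = pvClsI b p 0 (j : Int) := rfl
    rw [a1, a2, a3, a4]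
    push_cast
    ring_nf
  | succ m =>
    cases j with
    | zero =>
      rw [if_neg (by omega), zero_add]
      have a1 : pvED b p (m + 1 + 3) 3 = pvED b p (m + 3) 2 + pvClsI b p ((m + 4 : Nat) : Int) 3 := rfl
      have a2 : pvED b p (m + 3) 2 = pvED b p (m + 2) 1 + pvClsI b p ((m + 3 : Nat) : Int) 2 := rfl
      have a3 : pvED b p (m + 2) 1 = pvED b p (m + 1) 0 + pvClsI b p ((m + 2 : Nat) : Int) 1 := rfl
      have a4 : pvED b p (m + 1) 0 = pvClsI b p ((m + 1 : Nat) : Int) 0 := rfl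
      rw [a1, a2, a3, a4]
      push_cast
      ring_nf
    | succ n =>
      rw [if_pos ⟨by omega, by omega⟩, Nat.add_sub_cancel, Nat.add_sub_cancel]
      have a1 : pvED b p (m + 1 + 3) (n + 1 + 3) = pvED b p (m + 3) (n + 3)
          + pvClsI b p ((m + 4 : Nat) : Int) ((n + 4 : Nat) : Int) := rfl
      have a2 : pvED b p (m + 3) (n + 3) = pvED b p (m + 2) (n + 2)
          + pvClsI b p ((m + 3 : Nat) : Int) ((n + 3 : Nat) : Int) := rfl
      have a3 : pvED b p (m + 2) (n + 2) = pvED b p (m + 1) (n + 1)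
          + pvClsI b p ((m + 2 : Nat) : Int) ((n + 2 : Nat) : Int) := rfl
      have a4 : pvED b p (m + 1) (n + 1) = pvED b p m n
          + pvClsI b p ((m + 1 : Nat) : Int) ((n + 1 : Nat) : Int) := rfl
      rw [a1, a2, a3, a4]
      push_cast
      ring_nf

theorem pvEN_win (b : List (List Int)) (p : Int) (C : Nat) (i j : Nat)
    (hi : 3 ≤ i) (hj : j + 3 < C) :
    pvEN b p C i j = (if 4 ≤ i ∧ j + 4 < C then pvEN b p C (i - 4) (j + 4) else 0)
      + pvWinN b p i j := by
  obtain ⟨m, rfl⟩ : ∃ m : Nat, i = m + 3 := ⟨i - 3, by omega⟩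
  rw [pvWinN_sum]
  have n1 : pvEN b p C (m + 3) j = (if j + 1 < C then pvEN b p C (m + 2) (j + 1) else 0)
      + pvClsI b p ((m + 3 : Nat) : Int) (j : Int) := rfl
  have n2 : pvEN b p C (m + 2) (j + 1) = (if j + 2 < C then pvEN b p C (m + 1) (j + 2) else 0)
      + pvClsI b p ((m + 2 : Nat) : Int) ((j + 1 : Nat) : Int) := rfl
  have n3 : pvEN b p C (m + 1) (j + 2) = (if j + 3 < C then pvEN b p C m (j + 3) else 0)
      + pvClsI b p ((m + 1 : Nat) : Int) ((j + 2 : Nat) : Int) := rfl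
  rw [n1, if_pos (show j + 1 < C by omega), n2, if_pos (show j + 2 < C by omega), n3, if_pos hj]
  cases m with
  | zero =>
    rw [if_neg (by omega)]
    have n4 : pvEN b p C 0 (j + 3) = pvClsI b p 0 ((j + 3 : Nat) : Int) := rfl
    rw [n4]
    push_cast
    ring_nf
  | succ m' =>
    have n4 : pvEN b p C (m' + 1) (j + 3) = (if j + 4 < C then pvEN b p C m' (j + 4) else 0)
        + pvClsI b p ((m' + 1 : Nat) : Int) ((j + 3 : Nat) : Int) := rfl
    rw [n4, show (m' + 1 + 3 - 4 : Nat) = m' by omega]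
    by_cases hc : j + 4 < C
    · rw [if_pos hc, if_pos (⟨by omega, hc⟩ : 4 ≤ m' + 1 + 3 ∧ j + 4 < C)]
      push_cast
      ring_nf
    · rw [if_neg hc, if_neg (by omega : ¬ (4 ≤ m' + 1 + 3 ∧ j + 4 < C))]
      push_cast
      ring_nf

theorem pvTab_get_H (b : List (List Int)) (p : Int) (R C i j : Nat) (hi : i < R) (hj : j < C) :
    PySem.List.pyGetD (PySem.List.pyGetD (pvDriftTable b (R : Int) (C : Int) p 0 1) (i : Int) []) (j : Int) (0, 0)
      = pvEH b p i j := by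
  rw [pvDriftTable_eq, PySem.List.pyGetD_natCast, PySem.List.pyGetD_natCast,
      pvTabN_get _ _ _ _ _ hi]
  exact pvRow_get_H b p C _ i j hj

theorem pvTab_get_V (b : List (List Int)) (p : Int) (R C i j : Nat) (hi : i < R) (hj : j < C) :
    PySem.List.pyGetD (PySem.List.pyGetD (pvDriftTable b (R : Int) (C : Int) p 1 0) (i : Int) []) (j : Int) (0, 0)
      = pvEV b p i j := by
  rw [pvDriftTable_eq, PySem.List.pyGetD_natCast, PySem.List.pyGetD_natCast,
      pvTabN_get _ _ _ _ _ hi]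
  exact pvRow_get_V b p C i j hj

theorem pvTab_get_D (b : List (List Int)) (p : Int) (R C i j : Nat) (hi : i < R) (hj : j < C) :
    PySem.List.pyGetD (PySem.List.pyGetD (pvDriftTable b (R : Int) (C : Int) p 1 1) (i : Int) []) (j : Int) (0, 0)
      = pvED b p i j := by
  rw [pvDriftTable_eq, PySem.List.pyGetD_natCast, PySem.List.pyGetD_natCast,
      pvTabN_get _ _ _ _ _ hi]
  exact pvRow_get_D b p C i j hj

theorem pvTab_get_N (b : List (List Int)) (p : Int) (R C i j : Nat) (hi : i < R) (hj : j < C) :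
    PySem.List.pyGetD (PySem.List.pyGetD (pvDriftTable b (R : Int) (C : Int) p 1 (-1)) (i : Int) []) (j : Int) (0, 0)
      = pvEN b p C i j := by
  rw [pvDriftTable_eq, PySem.List.pyGetD_natCast, PySem.List.pyGetD_natCast,
      pvTabN_get _ _ _ _ _ hi]
  exact pvRow_get_N b p C i j hj

theorem pvBDir_H (b : List (List Int)) (p : Int) (t : Int × Int) :
    pvBDir b p (pvRN b : Int) (pvCN b : Int) (0, 1) t
    = (t.1 + ((PySem.List.pyRange 0 (pvRN b : Int) 1).map fun i =>
          ((PySem.List.pyRange 0 ((pvCN b : Int) - 3) 1).map fun j => pvP (pvWinH b p i j)).sum).sum,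
       t.2 + ((PySem.List.pyRange 0 (pvRN b : Int) 1).map fun i =>
          ((PySem.List.pyRange 0 ((pvCN b : Int) - 3) 1).map fun j => pvO (pvWinH b p i j)).sum).sum) := by
  unfold pvBDir
  rw [PySem.List.foldl_congr_mem (g := fun t ei =>
      (PySem.List.pyRange 0 (pvCN b : Int) 1).foldl (fun t ej =>
        (t.1 + (if 3 ≤ ej then pvP (pvWinH b p ei (ej - 3)) else 0),
         t.2 + (if 3 ≤ ej then pvO (pvWinH b p ei (ej - 3)) else 0))) t)]
  · simp only [pvFoldl_pair_add]
    have h1 : ∀ (F : Int × Int → Int),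
        ((PySem.List.pyRange 0 (pvRN b : Int) 1).map (fun ei =>
          ((PySem.List.pyRange 0 (pvCN b : Int) 1).map (fun ej =>
            if 3 ≤ ej then F (pvWinH b p ei (ej - 3)) else 0)).sum)).sum
        = ((PySem.List.pyRange 0 (pvRN b : Int) 1).map (fun ei =>
          ((PySem.List.pyRange 0 ((pvCN b : Int) - 3) 1).map (fun j =>
            F (pvWinH b p ei j))).sum)).sum := by
      intro F
      refine congrArg List.sum (List.map_congr_left ?_)
      intro ei _
      exact pvSum_shift3 (pvCN b : Int) (fun j => F (pvWinH b p ei j))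
    rw [h1 pvP, h1 pvO]
  · intro t0 ei hei
    rw [PySem.List.mem_pyRange_one] at hei
    obtain ⟨iN, rfl⟩ : ∃ n : Nat, ei = (n : Int) := ⟨ei.toNat, by omega⟩
    apply PySem.List.foldl_congr_mem
    intro t1 ej hej
    rw [PySem.List.mem_pyRange_one] at hej
    obtain ⟨jN, rfl⟩ : ∃ n : Nat, ej = (n : Int) := ⟨ej.toNat, by omega⟩
    have hiN : iN < pvRN b := by exact_mod_cast hei.2
    have hjN : jN < pvCN b := by exact_mod_cast hej.2
    dsimp only
    by_cases h3 : (3 : Int) ≤ (jN : Int)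
    · obtain ⟨j0, rfl⟩ : ∃ m : Nat, jN = m + 3 := ⟨jN - 3, by omega⟩
      rw [if_pos (⟨by omega, by omega, by omega, by omega⟩ :
            (0 : Int) ≤ (iN : Int) - 3 * 0 ∧ (iN : Int) - 3 * 0 < (pvRN b : Int) ∧
            (0 : Int) ≤ ((j0 + 3 : Nat) : Int) - 3 * 1 ∧ ((j0 + 3 : Nat) : Int) - 3 * 1 < (pvCN b : Int))]
      by_cases h1 : 1 ≤ j0
      · rw [if_pos (⟨by omega, by omega, by omega⟩ :
              (0 : Int) ≤ (iN : Int) - 4 * 0 ∧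
              (0 : Int) ≤ ((j0 + 3 : Nat) : Int) - 4 * 1 ∧ ((j0 + 3 : Nat) : Int) - 4 * 1 < (pvCN b : Int))]
        dsimp only
        rw [show ((j0 + 3 : Nat) : Int) - 4 * 1 = ((j0 - 1 : Nat) : Int) by omega,
            show (iN : Int) - 4 * 0 = (iN : Int) by ring]
        rw [pvTab_get_H b p (pvRN b) (pvCN b) iN (j0 + 3) hiN hjN,
            pvTab_get_H b p (pvRN b) (pvCN b) iN (j0 - 1) hiN (by omega),
            pvEH_win b p iN j0, if_pos h1]
        simp only [Prod.fst_add, Prod.snd_add, add_sub_cancel_left]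
        rw [pvStep_plain]
        rw [if_pos (show (3 : Int) ≤ ((j0 + 3 : Nat) : Int) by omega),
            if_pos (show (3 : Int) ≤ ((j0 + 3 : Nat) : Int) by omega),
            show ((j0 + 3 : Nat) : Int) - 3 = (j0 : Int) by omega]
      · rw [if_neg (by omega :
              ¬ ((0 : Int) ≤ (iN : Int) - 4 * 0 ∧
                 (0 : Int) ≤ ((j0 + 3 : Nat) : Int) - 4 * 1 ∧ ((j0 + 3 : Nat) : Int) - 4 * 1 < (pvCN b : Int)))]
        rw [pvTab_get_H b p (pvRN b) (pvCN b) iN (j0 + 3) hiN hjN,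
            pvEH_win b p iN j0, if_neg h1, zero_add]
        rw [pvStep_plain]
        rw [if_pos (show (3 : Int) ≤ ((j0 + 3 : Nat) : Int) by omega),
            if_pos (show (3 : Int) ≤ ((j0 + 3 : Nat) : Int) by omega),
            show ((j0 + 3 : Nat) : Int) - 3 = (j0 : Int) by omega]
    · rw [if_neg (by omega :
            ¬ ((0 : Int) ≤ (iN : Int) - 3 * 0 ∧ (iN : Int) - 3 * 0 < (pvRN b : Int) ∧
               (0 : Int) ≤ (jN : Int) - 3 * 1 ∧ (jN : Int) - 3 * 1 < (pvCN b : Int))),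
          if_neg h3, if_neg h3]
      cases t1
      simp

theorem pvBDir_V (b : List (List Int)) (p : Int) (t : Int × Int) :
    pvBDir b p (pvRN b : Int) (pvCN b : Int) (1, 0) t
    = (t.1 + ((PySem.List.pyRange 0 ((pvRN b : Int) - 3) 1).map fun i =>
          ((PySem.List.pyRange 0 (pvCN b : Int) 1).map fun j => pvP (pvWinV b p i j)).sum).sum,
       t.2 + ((PySem.List.pyRange 0 ((pvRN b : Int) - 3) 1).map fun i =>
          ((PySem.List.pyRange 0 (pvCN b : Int) 1).map fun j => pvO (pvWinV b p i j)).sum).sum) := by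
  unfold pvBDir
  rw [PySem.List.foldl_congr_mem (g := fun t ei =>
      (PySem.List.pyRange 0 (pvCN b : Int) 1).foldl (fun t ej =>
        (t.1 + (if 3 ≤ ei then pvP (pvWinV b p (ei - 3) ej) else 0),
         t.2 + (if 3 ≤ ei then pvO (pvWinV b p (ei - 3) ej) else 0))) t)]
  · simp only [pvFoldl_pair_add]
    have h1 : ∀ (F : Int × Int → Int),
        ((PySem.List.pyRange 0 (pvRN b : Int) 1).map (fun ei =>
          ((PySem.List.pyRange 0 (pvCN b : Int) 1).map (fun ej =>
            if 3 ≤ ei then F (pvWinV b p (ei - 3) ej) else 0)).sum)).sum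
        = ((PySem.List.pyRange 0 ((pvRN b : Int) - 3) 1).map (fun i =>
          ((PySem.List.pyRange 0 (pvCN b : Int) 1).map (fun j =>
            F (pvWinV b p i j))).sum)).sum := by
      intro F
      calc ((PySem.List.pyRange 0 (pvRN b : Int) 1).map (fun ei =>
          ((PySem.List.pyRange 0 (pvCN b : Int) 1).map (fun ej =>
            if 3 ≤ ei then F (pvWinV b p (ei - 3) ej) else 0)).sum)).sum
          = ((PySem.List.pyRange 0 (pvRN b : Int) 1).map (fun ei =>
            if 3 ≤ ei then ((PySem.List.pyRange 0 (pvCN b : Int) 1).map (fun ej =>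
              F (pvWinV b p (ei - 3) ej))).sum else 0)).sum := by
            refine congrArg List.sum (List.map_congr_left ?_)
            intro ei _
            exact pvSum_ite_const _ _ _
        _ = _ := pvSum_shift3 (pvRN b : Int)
              (fun i => ((PySem.List.pyRange 0 (pvCN b : Int) 1).map (fun j => F (pvWinV b p i j))).sum)
    rw [h1 pvP, h1 pvO]
  · intro t0 ei hei
    rw [PySem.List.mem_pyRange_one] at hei
    obtain ⟨iN, rfl⟩ : ∃ n : Nat, ei = (n : Int) := ⟨ei.toNat, by omega⟩
    apply PySem.List.foldl_congr_mem
    intro t1 ej hej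
    rw [PySem.List.mem_pyRange_one] at hej
    obtain ⟨jN, rfl⟩ : ∃ n : Nat, ej = (n : Int) := ⟨ej.toNat, by omega⟩
    have hiN : iN < pvRN b := by exact_mod_cast hei.2
    have hjN : jN < pvCN b := by exact_mod_cast hej.2
    dsimp only
    by_cases h3 : (3 : Int) ≤ (iN : Int)
    · obtain ⟨i0, rfl⟩ : ∃ m : Nat, iN = m + 3 := ⟨iN - 3, by omega⟩
      rw [if_pos (⟨by omega, by omega, by omega, by omega⟩ :
            (0 : Int) ≤ ((i0 + 3 : Nat) : Int) - 3 * 1 ∧ ((i0 + 3 : Nat) : Int) - 3 * 1 < (pvRN b : Int) ∧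
            (0 : Int) ≤ (jN : Int) - 3 * 0 ∧ (jN : Int) - 3 * 0 < (pvCN b : Int))]
      by_cases h1 : 1 ≤ i0
      · rw [if_pos (⟨by omega, by omega, by omega⟩ :
              (0 : Int) ≤ ((i0 + 3 : Nat) : Int) - 4 * 1 ∧
              (0 : Int) ≤ (jN : Int) - 4 * 0 ∧ (jN : Int) - 4 * 0 < (pvCN b : Int))]
        dsimp only
        rw [show ((i0 + 3 : Nat) : Int) - 4 * 1 = ((i0 - 1 : Nat) : Int) by omega,
            show (jN : Int) - 4 * 0 = (jN : Int) by ring]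
        rw [pvTab_get_V b p (pvRN b) (pvCN b) (i0 + 3) jN hiN hjN,
            pvTab_get_V b p (pvRN b) (pvCN b) (i0 - 1) jN (by omega) hjN,
            pvEV_win b p i0 jN, if_pos h1]
        simp only [Prod.fst_add, Prod.snd_add, add_sub_cancel_left]
        rw [pvStep_plain]
        rw [if_pos (show (3 : Int) ≤ ((i0 + 3 : Nat) : Int) by omega),
            if_pos (show (3 : Int) ≤ ((i0 + 3 : Nat) : Int) by omega),
            show ((i0 + 3 : Nat) : Int) - 3 = (i0 : Int) by omega]
      · rw [if_neg (by omega :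
              ¬ ((0 : Int) ≤ ((i0 + 3 : Nat) : Int) - 4 * 1 ∧
                 (0 : Int) ≤ (jN : Int) - 4 * 0 ∧ (jN : Int) - 4 * 0 < (pvCN b : Int)))]
        rw [pvTab_get_V b p (pvRN b) (pvCN b) (i0 + 3) jN hiN hjN,
            pvEV_win b p i0 jN, if_neg h1, zero_add]
        rw [pvStep_plain]
        rw [if_pos (show (3 : Int) ≤ ((i0 + 3 : Nat) : Int) by omega),
            if_pos (show (3 : Int) ≤ ((i0 + 3 : Nat) : Int) by omega),
            show ((i0 + 3 : Nat) : Int) - 3 = (i0 : Int) by omega]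
    · rw [if_neg (by omega :
            ¬ ((0 : Int) ≤ (iN : Int) - 3 * 1 ∧ (iN : Int) - 3 * 1 < (pvRN b : Int) ∧
               (0 : Int) ≤ (jN : Int) - 3 * 0 ∧ (jN : Int) - 3 * 0 < (pvCN b : Int))),
          if_neg h3, if_neg h3]
      cases t1
      simp

theorem pvBDir_D (b : List (List Int)) (p : Int) (t : Int × Int) :
    pvBDir b p (pvRN b : Int) (pvCN b : Int) (1, 1) t
    = (t.1 + ((PySem.List.pyRange 0 ((pvRN b : Int) - 3) 1).map fun i =>
          ((PySem.List.pyRange 0 ((pvCN b : Int) - 3) 1).map fun j => pvP (pvWinD b p i j)).sum).sum,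
       t.2 + ((PySem.List.pyRange 0 ((pvRN b : Int) - 3) 1).map fun i =>
          ((PySem.List.pyRange 0 ((pvCN b : Int) - 3) 1).map fun j => pvO (pvWinD b p i j)).sum).sum) := by
  unfold pvBDir
  rw [PySem.List.foldl_congr_mem (g := fun t ei =>
      (PySem.List.pyRange 0 (pvCN b : Int) 1).foldl (fun t ej =>
        (t.1 + (if 3 ≤ ej then (if 3 ≤ ei then pvP (pvWinD b p (ei - 3) (ej - 3)) else 0) else 0),
         t.2 + (if 3 ≤ ej then (if 3 ≤ ei then pvO (pvWinD b p (ei - 3) (ej - 3)) else 0) else 0))) t)]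
  · simp only [pvFoldl_pair_add]
    have h1 : ∀ (F : Int × Int → Int),
        ((PySem.List.pyRange 0 (pvRN b : Int) 1).map (fun ei =>
          ((PySem.List.pyRange 0 (pvCN b : Int) 1).map (fun ej =>
            if 3 ≤ ej then (if 3 ≤ ei then F (pvWinD b p (ei - 3) (ej - 3)) else 0) else 0)).sum)).sum
        = ((PySem.List.pyRange 0 ((pvRN b : Int) - 3) 1).map (fun i =>
          ((PySem.List.pyRange 0 ((pvCN b : Int) - 3) 1).map (fun j =>
            F (pvWinD b p i j))).sum)).sum := by
      intro F
      calc ((PySem.List.pyRange 0 (pvRN b : Int) 1).map (fun ei =>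
          ((PySem.List.pyRange 0 (pvCN b : Int) 1).map (fun ej =>
            if 3 ≤ ej then (if 3 ≤ ei then F (pvWinD b p (ei - 3) (ej - 3)) else 0) else 0)).sum)).sum
          = ((PySem.List.pyRange 0 (pvRN b : Int) 1).map (fun ei =>
            if 3 ≤ ei then ((PySem.List.pyRange 0 ((pvCN b : Int) - 3) 1).map (fun j =>
              F (pvWinD b p (ei - 3) j))).sum else 0)).sum := by
            refine congrArg List.sum (List.map_congr_left ?_)
            intro ei _
            rw [pvSum_shift3 (pvCN b : Int) (fun jj => if 3 ≤ ei then F (pvWinD b p (ei - 3) jj) else 0),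
                pvSum_ite_const]
        _ = _ := pvSum_shift3 (pvRN b : Int)
              (fun i => ((PySem.List.pyRange 0 ((pvCN b : Int) - 3) 1).map (fun j => F (pvWinD b p i j))).sum)
    rw [h1 pvP, h1 pvO]
  · intro t0 ei hei
    rw [PySem.List.mem_pyRange_one] at hei
    obtain ⟨iN, rfl⟩ : ∃ n : Nat, ei = (n : Int) := ⟨ei.toNat, by omega⟩
    apply PySem.List.foldl_congr_mem
    intro t1 ej hej
    rw [PySem.List.mem_pyRange_one] at hej
    obtain ⟨jN, rfl⟩ : ∃ n : Nat, ej = (n : Int) := ⟨ej.toNat, by omega⟩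
    have hiN : iN < pvRN b := by exact_mod_cast hei.2
    have hjN : jN < pvCN b := by exact_mod_cast hej.2
    dsimp only
    by_cases h3 : (3 : Int) ≤ (iN : Int) ∧ (3 : Int) ≤ (jN : Int)
    · obtain ⟨i0, rfl⟩ : ∃ m : Nat, iN = m + 3 := ⟨iN - 3, by omega⟩
      obtain ⟨j0, rfl⟩ : ∃ m : Nat, jN = m + 3 := ⟨jN - 3, by omega⟩
      rw [if_pos (⟨by omega, by omega, by omega, by omega⟩ :
            (0 : Int) ≤ ((i0 + 3 : Nat) : Int) - 3 * 1 ∧ ((i0 + 3 : Nat) : Int) - 3 * 1 < (pvRN b : Int) ∧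
            (0 : Int) ≤ ((j0 + 3 : Nat) : Int) - 3 * 1 ∧ ((j0 + 3 : Nat) : Int) - 3 * 1 < (pvCN b : Int))]
      by_cases h1 : 1 ≤ i0 ∧ 1 ≤ j0
      · rw [if_pos (⟨by omega, by omega, by omega⟩ :
              (0 : Int) ≤ ((i0 + 3 : Nat) : Int) - 4 * 1 ∧
              (0 : Int) ≤ ((j0 + 3 : Nat) : Int) - 4 * 1 ∧ ((j0 + 3 : Nat) : Int) - 4 * 1 < (pvCN b : Int))]
        dsimp only
        rw [show ((i0 + 3 : Nat) : Int) - 4 * 1 = ((i0 - 1 : Nat) : Int) by omega,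
            show ((j0 + 3 : Nat) : Int) - 4 * 1 = ((j0 - 1 : Nat) : Int) by omega]
        rw [pvTab_get_D b p (pvRN b) (pvCN b) (i0 + 3) (j0 + 3) hiN hjN,
            pvTab_get_D b p (pvRN b) (pvCN b) (i0 - 1) (j0 - 1) (by omega) (by omega),
            pvED_win b p i0 j0, if_pos h1]
        simp only [Prod.fst_add, Prod.snd_add, add_sub_cancel_left]
        rw [pvStep_plain]
        rw [if_pos (show (3 : Int) ≤ ((j0 + 3 : Nat) : Int) by omega),
            if_pos (show (3 : Int) ≤ ((j0 + 3 : Nat) : Int) by omega),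
            if_pos (show (3 : Int) ≤ ((i0 + 3 : Nat) : Int) by omega),
            if_pos (show (3 : Int) ≤ ((i0 + 3 : Nat) : Int) by omega),
            show ((i0 + 3 : Nat) : Int) - 3 = (i0 : Int) by omega,
            show ((j0 + 3 : Nat) : Int) - 3 = (j0 : Int) by omega]
      · rw [if_neg (by omega :
              ¬ ((0 : Int) ≤ ((i0 + 3 : Nat) : Int) - 4 * 1 ∧
                 (0 : Int) ≤ ((j0 + 3 : Nat) : Int) - 4 * 1 ∧ ((j0 + 3 : Nat) : Int) - 4 * 1 < (pvCN b : Int)))]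
        rw [pvTab_get_D b p (pvRN b) (pvCN b) (i0 + 3) (j0 + 3) hiN hjN,
            pvED_win b p i0 j0, if_neg h1, zero_add]
        rw [pvStep_plain]
        rw [if_pos (show (3 : Int) ≤ ((j0 + 3 : Nat) : Int) by omega),
            if_pos (show (3 : Int) ≤ ((j0 + 3 : Nat) : Int) by omega),
            if_pos (show (3 : Int) ≤ ((i0 + 3 : Nat) : Int) by omega),
            if_pos (show (3 : Int) ≤ ((i0 + 3 : Nat) : Int) by omega),
            show ((i0 + 3 : Nat) : Int) - 3 = (i0 : Int) by omega,
            show ((j0 + 3 : Nat) : Int) - 3 = (j0 : Int) by omega]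
    · rw [if_neg (by omega :
            ¬ ((0 : Int) ≤ (iN : Int) - 3 * 1 ∧ (iN : Int) - 3 * 1 < (pvRN b : Int) ∧
               (0 : Int) ≤ (jN : Int) - 3 * 1 ∧ (jN : Int) - 3 * 1 < (pvCN b : Int)))]
      split_ifs with hj hi
      · exact absurd ⟨hi, hj⟩ h3
      · cases t1; simp
      · cases t1; simp

theorem pvBDir_N (b : List (List Int)) (p : Int) (t : Int × Int) :
    pvBDir b p (pvRN b : Int) (pvCN b : Int) (1, -1) t
    = (t.1 + ((PySem.List.pyRange 3 (pvRN b : Int) 1).map fun i =>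
          ((PySem.List.pyRange 0 ((pvCN b : Int) - 3) 1).map fun j => pvP (pvWinN b p i j)).sum).sum,
       t.2 + ((PySem.List.pyRange 3 (pvRN b : Int) 1).map fun i =>
          ((PySem.List.pyRange 0 ((pvCN b : Int) - 3) 1).map fun j => pvO (pvWinN b p i j)).sum).sum) := by
  unfold pvBDir
  rw [PySem.List.foldl_congr_mem (g := fun t ei =>
      (PySem.List.pyRange 0 (pvCN b : Int) 1).foldl (fun t ej =>
        (t.1 + (if 3 ≤ ei then (if ej + 3 < (pvCN b : Int) then pvP (pvWinN b p ei ej) else 0) else 0),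
         t.2 + (if 3 ≤ ei then (if ej + 3 < (pvCN b : Int) then pvO (pvWinN b p ei ej) else 0) else 0))) t)]
  · simp only [pvFoldl_pair_add]
    have h1 : ∀ (F : Int × Int → Int),
        ((PySem.List.pyRange 0 (pvRN b : Int) 1).map (fun ei =>
          ((PySem.List.pyRange 0 (pvCN b : Int) 1).map (fun ej =>
            if 3 ≤ ei then (if ej + 3 < (pvCN b : Int) then F (pvWinN b p ei ej) else 0) else 0)).sum)).sum
        = ((PySem.List.pyRange 3 (pvRN b : Int) 1).map (fun i =>
          ((PySem.List.pyRange 0 ((pvCN b : Int) - 3) 1).map (fun j =>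
            F (pvWinN b p i j))).sum)).sum := by
      intro F
      calc ((PySem.List.pyRange 0 (pvRN b : Int) 1).map (fun ei =>
          ((PySem.List.pyRange 0 (pvCN b : Int) 1).map (fun ej =>
            if 3 ≤ ei then (if ej + 3 < (pvCN b : Int) then F (pvWinN b p ei ej) else 0) else 0)).sum)).sum
          = ((PySem.List.pyRange 0 (pvRN b : Int) 1).map (fun ei =>
            if 3 ≤ ei then ((PySem.List.pyRange 0 ((pvCN b : Int) - 3) 1).map (fun j =>
              F (pvWinN b p ei j))).sum else 0)).sum := by
            refine congrArg List.sum (List.map_congr_left ?_)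
            intro ei _
            rw [pvSum_ite_const, pvSum_trunc (pvCN b : Int) (fun ej => F (pvWinN b p ei ej))]
        _ = _ := pvSum_lower (pvRN b : Int)
              (fun i => ((PySem.List.pyRange 0 ((pvCN b : Int) - 3) 1).map (fun j => F (pvWinN b p i j))).sum)
    rw [h1 pvP, h1 pvO]
  · intro t0 ei hei
    rw [PySem.List.mem_pyRange_one] at hei
    obtain ⟨iN, rfl⟩ : ∃ n : Nat, ei = (n : Int) := ⟨ei.toNat, by omega⟩
    apply PySem.List.foldl_congr_mem
    intro t1 ej hej
    rw [PySem.List.mem_pyRange_one] at hej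
    obtain ⟨jN, rfl⟩ : ∃ n : Nat, ej = (n : Int) := ⟨ej.toNat, by omega⟩
    have hiN : iN < pvRN b := by exact_mod_cast hei.2
    have hjN : jN < pvCN b := by exact_mod_cast hej.2
    dsimp only
    by_cases h3 : (3 : Int) ≤ (iN : Int) ∧ (jN : Int) + 3 < (pvCN b : Int)
    · rw [if_pos (⟨by omega, by omega, by omega, by omega⟩ :
            (0 : Int) ≤ (iN : Int) - 3 * 1 ∧ (iN : Int) - 3 * 1 < (pvRN b : Int) ∧
            (0 : Int) ≤ (jN : Int) - 3 * (-1) ∧ (jN : Int) - 3 * (-1) < (pvCN b : Int))]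
      by_cases h4 : 4 ≤ iN ∧ jN + 4 < pvCN b
      · rw [if_pos (⟨by omega, by omega, by omega⟩ :
              (0 : Int) ≤ (iN : Int) - 4 * 1 ∧
              (0 : Int) ≤ (jN : Int) - 4 * (-1) ∧ (jN : Int) - 4 * (-1) < (pvCN b : Int))]
        dsimp only
        rw [show (iN : Int) - 4 * 1 = ((iN - 4 : Nat) : Int) by omega,
            show (jN : Int) - 4 * (-1) = ((jN + 4 : Nat) : Int) by push_cast; ring]
        rw [pvTab_get_N b p (pvRN b) (pvCN b) iN jN hiN hjN,
            pvTab_get_N b p (pvRN b) (pvCN b) (iN - 4) (jN + 4) (by omega) (by omega),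
            pvEN_win b p (pvCN b) iN jN (by omega) (by omega), if_pos h4]
        simp only [Prod.fst_add, Prod.snd_add, add_sub_cancel_left]
        rw [pvStep_plain]
        rw [if_pos (show (3 : Int) ≤ (iN : Int) from h3.1),
            if_pos (show (3 : Int) ≤ (iN : Int) from h3.1),
            if_pos (show (jN : Int) + 3 < (pvCN b : Int) from h3.2),
            if_pos (show (jN : Int) + 3 < (pvCN b : Int) from h3.2)]
      · rw [if_neg (by omega :
              ¬ ((0 : Int) ≤ (iN : Int) - 4 * 1 ∧
                 (0 : Int) ≤ (jN : Int) - 4 * (-1) ∧ (jN : Int) - 4 * (-1) < (pvCN b : Int)))]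
        rw [pvTab_get_N b p (pvRN b) (pvCN b) iN jN hiN hjN,
            pvEN_win b p (pvCN b) iN jN (by omega) (by omega), if_neg h4, zero_add]
        rw [pvStep_plain]
        rw [if_pos (show (3 : Int) ≤ (iN : Int) from h3.1),
            if_pos (show (3 : Int) ≤ (iN : Int) from h3.1),
            if_pos (show (jN : Int) + 3 < (pvCN b : Int) from h3.2),
            if_pos (show (jN : Int) + 3 < (pvCN b : Int) from h3.2)]
    · rw [if_neg (by omega :
            ¬ ((0 : Int) ≤ (iN : Int) - 3 * 1 ∧ (iN : Int) - 3 * 1 < (pvRN b : Int) ∧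
               (0 : Int) ≤ (jN : Int) - 3 * (-1) ∧ (jN : Int) - 3 * (-1) < (pvCN b : Int)))]
      split_ifs with hi hj
      · exact absurd ⟨hi, hj⟩ h3
      · cases t1; simp
      · cases t1; simp

theorem pvAlt_shape (b : List (List Int)) (p : Int) :
    num_possible_wins_alt b p =
      (let rows : Int := PySem.List.len b
       let cols : Int := if rows ≠ 0 then PySem.List.len (PySem.List.pyGetD b 0 []) else 0
       pvBDir b p rows cols (1, -1)
         (pvBDir b p rows cols (1, 1)
           (pvBDir b p rows cols (1, 0)
             (pvBDir b p rows cols (0, 1) (0, 0))))) := rfl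

theorem pvB_eq (b : List (List Int)) (p : Int) (hb : b ≠ []) :
    num_possible_wins_alt b p = pvNF b p := by
  rw [pvAlt_shape]
  dsimp only
  have hrows : PySem.List.len b = (pvRN b : Int) := pvR_eq b
  have hne : PySem.List.len b ≠ 0 := by
    rw [hrows]
    simp only [ne_eq, Int.natCast_eq_zero]
    simpa [pvRN, List.length_eq_zero_iff] using hb
  have hcols : (if PySem.List.len b ≠ 0 then PySem.List.len (PySem.List.pyGetD b 0 []) else 0)
      = (pvCN b : Int) := by
    rw [if_pos hne]
    exact pvC_eq b
  rw [hcols]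
  simp only [hrows]
  rw [pvBDir_H, pvBDir_V, pvBDir_D, pvBDir_N]
  simp only [pvNF, pvR_eq, pvC_eq, Prod.ext_iff]
  constructor <;> ring

theorem pv_port_eq (board : List (List Int)) (player : Int) :
    num_possible_wins board player = num_possible_wins_alt board player := by
  cases board with
  | nil => exact num_possible_wins_nil player
  | cons r rs =>
    rw [pvA_eq, pvB_eq (r :: rs) player (by simp)]

-- ===== VERDICT (by name: the statement is the Claim_ definition above) =====
theorem num_possible_wins_spec : Claim_equal_num_possible_wins := by
  intro board player _ _
  exact pv_port_eq board player
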